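-- pv_equiv track=rewrite | github.com/Apgoldberg1/primecity | primetests.py | absolute
-- ===== SOURCE A (Python) =====
-- import math
-- from itertools import permutations
--
-- def prime(number):
--     #checks if number has only factors of 1 and itself
--     factors = []
--     factorsum = 0
--     for i in range(math.floor(number / 2)):
--         if number % (i + 1) == 0:
--             factors.append(i + 1)
--     for l in range(len(factors)):
--         factorsum += factors[l]
--     if factorsum == 1:
--         return True
--     else:
--         return False
--
-- def absolute(number):
--   #any permutations results in a prime
--   lstnum = []
--   for i in str(number):
--     lstnum.append(i)
--   perm = permutations(lstnum)
--   for num in list(perm):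
--     test = ''
--     for digit in num:
--       test += digit
--     if not prime(int(test)):
--       return False
--   return True
-- ===== SOURCE B (Python) =====
-- import math
-- from itertools import permutations
--
-- def absolute(number):
--     # negative numbers are never prime, so some permutation (the number itself) already fails
--     if number < 0:
--         return False
--     values = {int(''.join(p)) for p in permutations(str(number))}
--     return all(
--         v >= 2 and all(v % d != 0 for d in range(2, math.isqrt(v) + 1))
--         for v in values
--     )
-- ===== Notes on version B (the rewrite author's own statement) =====
-- stated objective: faster
-- what changed: B tests the deduplicated set of permutation values with an early-exit trial division bounded by isqrt(v) (and rejects negatives directly), instead of A's per-permutation collection and summation of all divisors up to v/2.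
import Mathlib
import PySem

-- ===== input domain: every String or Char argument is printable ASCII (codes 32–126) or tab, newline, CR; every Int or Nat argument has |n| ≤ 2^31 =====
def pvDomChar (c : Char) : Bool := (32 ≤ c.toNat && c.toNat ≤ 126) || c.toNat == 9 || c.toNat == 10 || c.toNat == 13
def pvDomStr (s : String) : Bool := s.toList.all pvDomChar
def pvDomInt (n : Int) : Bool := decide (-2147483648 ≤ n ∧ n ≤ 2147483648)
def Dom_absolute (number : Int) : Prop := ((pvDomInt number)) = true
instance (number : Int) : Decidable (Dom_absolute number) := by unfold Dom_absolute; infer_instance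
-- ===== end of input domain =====

-- B replaces A's per-permutation divisor-sum primality scan (all divisors up to n/2) by a
-- deduplicated set of permutation values tested with an early-exit trial division up to isqrt(n),
-- plus a direct negative guard (objective: alternative/faster per-test bound).


-- ===== PORT A =====
-- helper `prime` of A; math.floor(number / 2) = floor division by 2, exact for |number| ≤ 2^31
def pvPrime (number : Int) : Bool :=
  let factors : List Int :=
    (PySem.List.pyRange 0 (PySem.Int.floordiv number 2) 1).foldl
      (fun acc i => if PySem.Int.mod number (i + 1) == 0 then acc ++ [i + 1] else acc) []
  let factorsum : Int :=
    (PySem.List.pyRange 0 (PySem.List.len factors) 1).foldl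
      (fun s l => s + PySem.List.pyGetD factors l 0) 0
  if factorsum == 1 then true else false

-- the `for num in list(perm)` loop with its early `return False`;
-- `none` = int() ValueError, unreachable: the first permutation is str(number) itself, it parses,
-- and for the only inputs producing later unparsable permutations (negative numbers) the first
-- permutation already returns False.
def pvAbsLoop : List (List Char) → Bool
  | [] => true
  | num :: rest =>
    let test : List Char := num.foldl (fun acc c => acc ++ [c]) []   -- test += digit
    match PySem.Int.ofChars? test with
    | none => false
    | some t => if !pvPrime t then false else pvAbsLoop rest

def absolute (number : Int) : Bool :=
  let lstnum : List Char := (PySem.Int.toChars number).foldl (fun acc c => acc ++ [c]) []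
  pvAbsLoop (PySem.List.permutations lstnum lstnum.length)

-- ===== PORT B =====
-- v >= 2 and all(v % d != 0 for d in range(2, math.isqrt(v) + 1)); isqrt is only reached on v ≥ 0
def pvIsPrimeAlt (v : Int) : Bool :=
  decide (2 ≤ v) && (PySem.List.pyRange 2 ((Nat.sqrt v.toNat : Int) + 1) 1).all
    (fun d => !(PySem.Int.mod v d == 0))

def absolute_alt (number : Int) : Bool :=
  if number < 0 then false
  else
    let digits : List Char := PySem.Int.toChars number
    let values : PySem.Set Int := PySem.Set.ofList
      ((PySem.List.permutations digits digits.length).map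
        (fun p => (PySem.Int.ofChars? p).getD 0))   -- int(''.join(p)), never a ValueError for number ≥ 0
    List.all values pvIsPrimeAlt

-- ===== PRECONDITION & SPEC =====
def Spec_absolute (number : Int) (out : Bool) : Prop := out = absolute_alt number
instance (number : Int) (out : Bool) : Decidable (Spec_absolute number out) := by unfold Spec_absolute; infer_instance

-- ===== CLAIM (what is proved, stated in full; the proofs are below) =====
def Claim_equal_absolute : Prop := ∀ (number : Int), Dom_absolute number → Spec_absolute number (absolute number)

-- ===== LEMMAS AND PROOFS =====

-- A's prime() returns false on every input < 2 (empty factor loop)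
lemma pvPrime_small (v : Int) (hv : v < 2) : pvPrime v = false := by
  have h2 : PySem.Int.floordiv v 2 ≤ 0 := by
    have := (PySem.Int.floordiv_lt_iff_lt_mul (a := v) (b := 2) (q := 1) (by norm_num)).2 (by omega)
    omega
  unfold pvPrime
  rw [PySem.List.pyRange_one_eq_nil h2]
  simp [PySem.List.pyRange_one_eq_nil]

lemma pvIsPrimeAlt_small (v : Int) (hv : v < 2) : pvIsPrimeAlt v = false := by
  unfold pvIsPrimeAlt
  simp [show ¬ (2 ≤ v) by omega]

-- characterisation of A's prime() for v ≥ 2: no divisor d with 2 ≤ d ≤ v // 2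
lemma pvPrime_char (v : Int) (hv : 2 ≤ v) :
    pvPrime v = decide (∀ d : Int, 2 ≤ d → d ≤ PySem.Int.floordiv v 2 → ¬ d ∣ v) := by
  have hh : 1 ≤ PySem.Int.floordiv v 2 := by
    rw [PySem.Int.le_floordiv_iff_mul_le (by norm_num)]; omega
  simp only [pvPrime, PySem.List.foldl_append_if, List.nil_append, PySem.List.len_eq]
  rw [PySem.List.foldl_pyRange_zero_pyGetD' _ 0 (fun s x => s + x) 0]
  rw [PySem.List.foldl_add _ (fun x => x) 0]
  rw [PySem.List.pyRange_one_cons (by omega)]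
  rw [List.filter_cons_of_pos (by simp)]
  simp only [List.map_cons, List.map_map, List.sum_cons, zero_add]
  set m : List Int := List.map ((fun x => x) ∘ fun x => x + 1)
      (List.filter (fun x => PySem.Int.mod v (x + 1) == 0)
        (PySem.List.pyRange 1 (PySem.Int.floordiv v 2))) with hm_def
  have hm : ∀ y ∈ m, (2:Int) ≤ y := by
    intro y hy
    simp only [hm_def, List.mem_map, Function.comp] at hy
    obtain ⟨x, hx, rfl⟩ := hy
    have := (PySem.List.mem_pyRange_one.mp (List.mem_filter.mp hx).1).1
    omega
  have key : (1 + m.sum = 1) ↔ (∀ d : Int, 2 ≤ d → d ≤ PySem.Int.floordiv v 2 → ¬ d ∣ v) := by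
    constructor
    · intro h1 d h2 h3 hdvd
      have hmem : d ∈ m := by
        simp only [hm_def, List.mem_map, Function.comp]
        refine ⟨d - 1, List.mem_filter.mpr
          ⟨PySem.List.mem_pyRange_one.mpr ⟨by omega, by omega⟩, ?_⟩, by ring⟩
        rw [show d - 1 + 1 = d by ring]
        simp [PySem.Int.mod_eq_zero_iff_dvd, hdvd]
      have := List.single_le_sum (fun y hy => le_trans (by norm_num) (hm y hy)) d hmem
      omega
    · intro hP
      have hnil : m = [] := by
        rw [hm_def, List.map_eq_nil_iff, List.filter_eq_nil_iff]
        intro x hx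
        have hx' := PySem.List.mem_pyRange_one.mp hx
        simp only [beq_iff_eq, PySem.Int.mod_eq_zero_iff_dvd]
        exact fun hc => hP (x + 1) (by omega) (by omega) hc
      rw [hnil]; simp
  split_ifs with h1
  · simp only [beq_iff_eq] at h1
    exact (decide_eq_true (key.mp h1)).symm
  · rw [eq_comm, decide_eq_false_iff_not]
    exact fun hp => h1 (by simp [key.mpr hp])

-- characterisation of B's test for v ≥ 2: no divisor d with 2 ≤ d ≤ isqrt v
lemma pvIsPrimeAlt_char (v : Int) (hv : 2 ≤ v) :
    pvIsPrimeAlt v = decide (∀ d : Int, 2 ≤ d → d ≤ (Nat.sqrt v.toNat : Int) → ¬ d ∣ v) := by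
  unfold pvIsPrimeAlt
  rw [Bool.eq_iff_iff]
  simp only [Bool.and_eq_true, decide_eq_true_iff, List.all_eq_true,
    PySem.List.mem_pyRange_one, Bool.not_eq_eq_eq_not, Bool.not_true, beq_eq_false_iff_ne,
    ne_eq, PySem.Int.mod_eq_zero_iff_dvd]
  constructor
  · rintro ⟨-, h⟩ d h2 hs
    exact h d ⟨h2, by omega⟩
  · exact fun h => ⟨hv, fun d hd => h d hd.1 (by omega)⟩

-- the arithmetic bridge: both divisor bounds characterise primality of v.toNat
lemma bridge (v : Int) (hv : 2 ≤ v) :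
    (∀ d : Int, 2 ≤ d → d ≤ PySem.Int.floordiv v 2 → ¬ d ∣ v) ↔
    (∀ d : Int, 2 ≤ d → d ≤ (Nat.sqrt v.toNat : Int) → ¬ d ∣ v) := by
  set n : Nat := v.toNat with hn
  have hvn : v = (n : Int) := by omega
  have hn2 : 2 ≤ n := by omega
  have hfd : PySem.Int.floordiv v 2 = ((n / 2 : Nat) : Int) := by
    rw [hvn]; exact_mod_cast PySem.Int.floordiv_natCast n 2
  have left_iff : (∀ d : Int, 2 ≤ d → d ≤ PySem.Int.floordiv v 2 → ¬ d ∣ v) ↔ Nat.Prime n := by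
    constructor
    · intro h
      by_contra hnp
      obtain ⟨m, hmdvd, hm2, hmlt⟩ := Nat.exists_dvd_of_not_prime2 hn2 hnp
      obtain ⟨c, hc⟩ := id hmdvd
      have hc2 : 2 ≤ c := by
        rcases Nat.lt_or_ge c 2 with h' | h'
        · interval_cases c <;> omega
        · exact h'
      have h2m : 2 * m ≤ n := by
        calc 2 * m = m * 2 := by ring
          _ ≤ m * c := Nat.mul_le_mul_left m hc2
          _ = n := hc.symm
      have hm_le : m ≤ n / 2 := by omega
      exact h (m : Int) (by exact_mod_cast hm2) (by rw [hfd]; exact_mod_cast hm_le)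
        (by rw [hvn]; exact_mod_cast hmdvd)
    · intro hp d h2 hle hdvd
      have hd : (d.toNat : Int) = d := by omega
      have hdn : d.toNat ∣ n := by
        rw [← Int.natCast_dvd_natCast, hd, ← hvn]; exact hdvd
      have := Nat.Prime.eq_one_or_self_of_dvd hp _ hdn
      have hlt : d.toNat ≤ n / 2 := by rw [hfd] at hle; omega
      have : n / 2 < n := by omega
      omega
  have right_iff : (∀ d : Int, 2 ≤ d → d ≤ (Nat.sqrt n : Int) → ¬ d ∣ v) ↔ Nat.Prime n := by
    rw [Nat.prime_def_le_sqrt]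
    constructor
    · intro h
      refine ⟨hn2, fun m hm2 hms hmdvd => ?_⟩
      exact h (m : Int) (by exact_mod_cast hm2) (by exact_mod_cast hms)
        (by rw [hvn]; exact_mod_cast hmdvd)
    · rintro ⟨-, h⟩ d h2 hs hdvd
      have hd : (d.toNat : Int) = d := by omega
      refine h d.toNat (by omega) (by omega) ?_
      rw [← Int.natCast_dvd_natCast, hd, ← hvn]; exact hdvd
  rw [left_iff, right_iff]

lemma prime_eq_alt (v : Int) : pvPrime v = pvIsPrimeAlt v := by
  by_cases hv : v < 2
  · rw [pvPrime_small v hv, pvIsPrimeAlt_small v hv]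
  · have hv' : 2 ≤ v := by omega
    rw [pvPrime_char v hv', pvIsPrimeAlt_char v hv']
    simp only [decide_eq_decide]
    exact bridge v hv'

-- A's early-return loop is an `all` over the permutation list
lemma loop_eq_all (ps : List (List Char)) :
    pvAbsLoop ps = ps.all (fun num => pvIsPrimeAlt ((PySem.Int.ofChars? num).getD 0)) := by
  induction ps with
  | nil => rfl
  | cons num rest ih =>
    show (match PySem.Int.ofChars? (num.foldl (fun acc c => acc ++ [c]) []) with
      | none => false
      | some t => if !pvPrime t then false else pvAbsLoop rest) = _
    rw [PySem.List.foldl_append_singleton num []]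
    simp only [List.nil_append, List.all_cons]
    cases h : PySem.Int.ofChars? num with
    | none => simp [pvIsPrimeAlt_small 0 (by norm_num)]
    | some t =>
      simp only [Option.getD_some]
      rw [← prime_eq_alt t]
      cases hp : pvPrime t
      · simp
      · simp [ih]

-- all() over set(xs) equals all() over xs
lemma all_ofList {α : Type} [DecidableEq α] (xs : List α) (f : α → Bool) :
    List.all (PySem.Set.ofList xs) f = xs.all f := by
  rw [Bool.eq_iff_iff]
  simp only [List.all_eq_true]
  constructor <;> intro h x hx
  · exact h x ((PySem.Set.mem_ofList xs x).mpr hx)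
  · exact h x ((PySem.Set.mem_ofList xs x).mp hx)

-- the first element of permutations(l) is l itself
lemma permutations_head {α : Type} (l : List α) :
    ∃ t, PySem.List.permutations l l.length = l :: t := by
  induction l with
  | nil => exact ⟨[], by rw [List.length_nil, PySem.List.permutations_zero]⟩
  | cons x xs ih =>
    obtain ⟨t, ht⟩ := ih
    rw [show (x :: xs).length = xs.length + 1 from rfl, PySem.List.permutations_succ,
      show (x :: xs).length = xs.length + 1 from rfl, List.range_succ_eq_map,
      List.flatMap_cons]
    simp only [List.getElem?_cons_zero, List.eraseIdx_cons_zero, ht, List.map_cons]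
    exact ⟨_, rfl⟩

-- parsing a '-'-headed string never yields a positive int
lemma neg_parse (ds : List Char) (v : Int) (h : PySem.Int.ofChars? ('-' :: ds) = some v) : v ≤ 0 := by
  simp only [PySem.Int.ofChars?] at h
  rw [List.dropWhile_cons_of_neg (by decide)] at h
  rw [List.reverse_cons, List.dropWhile_append] at h
  by_cases he : (List.dropWhile PySem.Int.isIntSpace ds.reverse).isEmpty
  · rw [if_pos he] at h
    rw [show List.dropWhile PySem.Int.isIntSpace ['-'] = ['-'] from by decide] at h
    simp only [List.reverse_cons, List.reverse_nil, List.nil_append, bind, Option.bind_eq_some_iff,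
      Option.map_eq_some_iff, pure, Option.some_inj] at h
    obtain ⟨a, ⟨b, -, rfl⟩, rfl⟩ := h
    omega
  · rw [if_neg he, List.reverse_append] at h
    simp only [List.reverse_cons, List.reverse_nil, List.nil_append, List.singleton_append, bind,
      Option.bind_eq_some_iff, Option.map_eq_some_iff, pure, Option.some_inj] at h
    obtain ⟨a, ⟨b, -, rfl⟩, rfl⟩ := h
    omega

-- ===== VERDICT (by name: the statement is the Claim_ definition above) =====
theorem absolute_spec : Claim_equal_absolute := by
  intro number _
  unfold Spec_absolute absolute absolute_alt
  rw [PySem.List.foldl_append_singleton _ [], List.nil_append]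
  rw [loop_eq_all]
  by_cases hn : number < 0
  · rw [if_pos hn]
    obtain ⟨t, ht⟩ := permutations_head (PySem.Int.toChars number)
    rw [ht]
    have hneg : PySem.Int.toChars number = '-' :: Nat.toDigits 10 number.natAbs := by
      simp [PySem.Int.toChars, hn]
    simp only [List.all_cons, Bool.and_eq_false_iff]
    left
    rw [hneg]
    cases h : PySem.Int.ofChars? ('-' :: Nat.toDigits 10 number.natAbs) with
    | none => simp [pvIsPrimeAlt_small 0 (by norm_num)]
    | some w =>
      have := neg_parse _ _ h
      simp [pvIsPrimeAlt_small w (by omega)]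
  · rw [if_neg hn]
    rw [show PySem.Set.ofList = fun xs => @PySem.Set.ofList Int _ xs from rfl]
    rw [all_ofList, List.all_map]
    rfl
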